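-- pv_equiv track=rewrite | github.com/praneet195/MIT-6.00.2x | Mid-Term/Problem-3.py | song_playlist
-- ===== SOURCE A (Python) =====
-- def song_playlist(songs, max_size):
--
--     playlist = []
--     if songs[0][2] <= max_size:
--         playlist.append(songs[0][0])
--     else:
--         return playlist
--     song_ascend = sorted(songs, key = lambda x: x[2])
--     song_ascend.remove(songs[0])
--     rem_space = max_size - songs[0][2]
--     for i in song_ascend:
--         if i[2] <= rem_space:
--             playlist.append(i[0])
--             rem_space -= i[2]
--         else:
--             break
--     return playlist
-- ===== SOURCE B (Python) =====
-- def song_playlist(songs, max_size):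
--     first = songs[0]
--     if first[2] > max_size:
--         return []
--     rest = sorted(songs, key=lambda x: x[2])
--     rest.remove(first)
--     budget = max_size - first[2]
--     # prefix sums of sizes of the trimmed sorted list
--     pre = []
--     acc = 0
--     for x in rest:
--         acc += x[2]
--         pre.append(acc)
--     # cutoff: index of the first prefix sum exceeding the budget
--     k = next((i for i, p in enumerate(pre) if p > budget), len(pre))
--     return [first[0]] + [x[0] for x in rest[:k]]
-- ===== Notes on version B (the rewrite author's own statement) =====
-- stated objective: alternative
-- what changed: Replaces A's running-subtraction loop with early break by a prefix-sum table over the sorted tail plus a first-exceeding-index cutoff and a slice, assembling the playlist by mapping names over rest[:k] instead of appending inside the greedy loop.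
import Mathlib
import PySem

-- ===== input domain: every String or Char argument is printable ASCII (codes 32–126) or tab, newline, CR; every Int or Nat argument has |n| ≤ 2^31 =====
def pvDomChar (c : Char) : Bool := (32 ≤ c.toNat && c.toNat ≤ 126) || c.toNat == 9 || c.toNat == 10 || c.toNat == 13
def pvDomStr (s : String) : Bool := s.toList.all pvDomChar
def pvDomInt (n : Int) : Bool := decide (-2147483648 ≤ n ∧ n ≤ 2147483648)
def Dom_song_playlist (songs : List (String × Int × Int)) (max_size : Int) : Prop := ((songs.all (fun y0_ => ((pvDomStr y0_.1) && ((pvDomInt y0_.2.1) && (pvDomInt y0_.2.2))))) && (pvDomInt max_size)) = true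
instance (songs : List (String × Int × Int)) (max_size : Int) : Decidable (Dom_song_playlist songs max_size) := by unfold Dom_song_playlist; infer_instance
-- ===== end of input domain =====

-- B replaces A's running-subtraction greedy loop with a prefix-sum table, a
-- first-exceeding-index cutoff and a slice (objective: alternative, same cost).

-- ===== PORT A =====
-- the 'for i in song_ascend: … else: break' loop of A (appending names, running remainder)
def pvLoopA : List (String × Int × Int) → Int → List String
  | [], _ => []
  | i :: t, rem_space =>
    if i.2.2 ≤ rem_space then i.1 :: pvLoopA t (rem_space - i.2.2) else []

def song_playlist (songs : List (String × Int × Int)) (max_size : Int) : List String :=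
  match songs with
  | [] => []   -- songs[0] raises IndexError; excluded by Pre_song_playlist
  | s0 :: _ =>
    if s0.2.2 ≤ max_size then
      let song_ascend := PySem.List.sorted songs (fun x => x.2.2)
      -- .remove(songs[0]) cannot raise: songs[0] is in the sorted permutation
      let song_ascend := (PySem.List.remove? song_ascend s0).getD []
      s0.1 :: pvLoopA song_ascend (max_size - s0.2.2)
    else []

-- ===== PORT B =====
-- the 'for x in rest: acc += x[2]; pre.append(acc)' prefix-sum loop of Source B
def pvPreSums : List (String × Int × Int) → Int → List Int
  | [], _ => []
  | x :: t, acc => (acc + x.2.2) :: pvPreSums t (acc + x.2.2)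

def song_playlist_alt (songs : List (String × Int × Int)) (max_size : Int) : List String :=
  match songs with
  | [] => []   -- songs[0] raises IndexError; excluded by Pre_song_playlist
  | first :: _ =>
    if max_size < first.2.2 then []
    else
      let rest := (PySem.List.remove? (PySem.List.sorted songs (fun x => x.2.2)) first).getD []
      let budget := max_size - first.2.2
      let pre := pvPreSums rest 0
      let k := (pre.findIdx? (fun p => budget < p)).getD pre.length
      first.1 :: (rest.take k).map (fun x => x.1)

-- ===== PRECONDITION & SPEC =====
-- A (and B) raise IndexError on the empty list; nothing else can raise.
def Pre_song_playlist (songs : List (String × Int × Int)) (max_size : Int) : Prop := songs ≠ []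
instance (songs : List (String × Int × Int)) (max_size : Int) : Decidable (Pre_song_playlist songs max_size) := by unfold Pre_song_playlist; infer_instance

def pvWitness_song_playlist : (List (String × Int × Int)) × Int := ([("a", 1, 2), ("b", 2, 1)], 5)

def Spec_song_playlist (songs : List (String × Int × Int)) (max_size : Int) (out : List String) : Prop := out = song_playlist_alt songs max_size
instance (songs : List (String × Int × Int)) (max_size : Int) (out : List String) : Decidable (Spec_song_playlist songs max_size out) := by unfold Spec_song_playlist; infer_instance

-- ===== CLAIM (what is proved, stated in full; the proofs are below) =====
def Claim_equal_song_playlist : Prop := ∀ (songs : List (String × Int × Int)) (max_size : Int), Dom_song_playlist songs max_size → Pre_song_playlist songs max_size → Spec_song_playlist songs max_size (song_playlist songs max_size)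

-- ===== LEMMAS AND PROOFS =====

-- A's greedy loop equals B's take-up-to-cutoff over the prefix sums.
theorem pvLoop_eq_take (l : List (String × Int × Int)) (b a : Int) :
    pvLoopA l (b - a) =
      (l.take (((pvPreSums l a).findIdx? (fun p => b < p)).getD (pvPreSums l a).length)).map
        (fun x => x.1) := by
  induction l generalizing a with
  | nil => simp [pvLoopA, pvPreSums]
  | cons x t ih =>
    simp only [pvPreSums, List.findIdx?_cons]
    by_cases h : b < a + x.2.2
    · have hx : ¬ x.2.2 ≤ b - a := by omega
      simp [pvLoopA, hx, h]
    · have hx : x.2.2 ≤ b - a := by omega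
      have hb : (decide (b < a + x.2.2)) = false := by simp [h]
      simp only [hb, Bool.false_eq_true, if_false, List.length_cons]
      have := ih (a + x.2.2)
      have harg : b - a - x.2.2 = b - (a + x.2.2) := by ring
      rcases hfi : (pvPreSums t (a + x.2.2)).findIdx? (fun p => b < p) with _ | j
      · simp [pvLoopA, hx, hfi, harg ▸ this]
      · simp only [hfi, Option.map_some, Option.getD_some]
        simp [pvLoopA, hx]
        rw [harg, this, hfi]
        simp

theorem song_playlist_eq (songs : List (String × Int × Int)) (max_size : Int)
    (h : songs ≠ []) : song_playlist songs max_size = song_playlist_alt songs max_size := by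
  match songs with
  | [] => exact absurd rfl h
  | s0 :: tl =>
    simp only [song_playlist, song_playlist_alt]
    by_cases hle : s0.2.2 ≤ max_size
    · have hlt : ¬ max_size < s0.2.2 := by omega
      simp only [hle, if_true, hlt, if_false]
      have h0 := pvLoop_eq_take
        ((PySem.List.remove? (PySem.List.sorted (s0 :: tl) (fun x => x.2.2)) s0).getD [])
        (max_size - s0.2.2) 0
      rw [sub_zero] at h0
      rw [h0]
    · have hlt : max_size < s0.2.2 := by omega
      simp [hle, hlt]

-- ===== VERDICT (by name: the statement is the Claim_ definition above) =====
theorem song_playlist_spec : Claim_equal_song_playlist := by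
  intro songs max_size _ hpre
  unfold Spec_song_playlist
  exact song_playlist_eq songs max_size hpre
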